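-- pv_equiv track=rewrite | github.com/Habeomsu/BaekJoon | 프로그래머스/불량 사용자.py | solution
-- ===== SOURCE A (Python) =====
-- def solution(user_id, banned_id):
--     answer = 0
--
--     n = len(banned_id)
--
--     banned_list = [[] for _ in range(len(banned_id))]
--
--     for i in range(len(banned_id)):
--         target = banned_id[i]
--
--         for user in user_id:
--             if len(target) != len(user):
--                 continue
--             else:
--                 result = True
--                 for j in range(len(user)):
--                     if target[j] == '*':
--                         continue
--                     elif target[j] == user[j]:
--                         continue
--                     else:
--                         result = False
--                         break
--                 if result == True:
--                     banned_list[i].append(user)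
--
--     total = []
--
--     def dfs(banned_list, now_set, idx):
--         if idx == n:
--             now_list = list(now_set)
--             now_list = sorted(now_list)
--             total.append(now_list)
--             return
--
--         for banned in banned_list[idx]:
--             if banned in now_set:
--                 continue
--             else:
--                 now_set.add(banned)
--                 dfs(banned_list, now_set, idx + 1)
--                 now_set.remove(banned)
--
--     start_set = set()
--     dfs(banned_list, start_set, 0)
--
--     total_set = set()
--
--     for tot in total:
--         tot_str = ''
--         for t in tot:
--             tot_str += t
--         total_set.add(tot_str)
--
--     answer = len(total_set)
--
--     return answer
-- ===== SOURCE B (Python) =====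
-- def solution(user_id, banned_id):
--     def matches(pat, user):
--         return len(pat) == len(user) and all(
--             p == '*' or p == u for p, u in zip(pat, user))
--
--     candidates = [[u for u in user_id if matches(pat, u)] for pat in banned_id]
--
--     states = [[]]
--     for cands in candidates:
--         states = [t + [u] for t in states for u in cands if u not in t]
--
--     return len({''.join(sorted(t)) for t in states})
-- ===== Notes on version B (the rewrite author's own statement) =====
-- stated objective: alternative
-- what changed: Replaces A's recursive DFS backtracking (a shared mutable 'now' set, an accumulator list and per-leaf string building) by an iterative level-by-level comprehension that extends all partial assignments at once, with a final set-comprehension dedupe by the sorted-concatenation key; the per-pattern matching loop becomes a zip-based predicate filter.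
import Mathlib
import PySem

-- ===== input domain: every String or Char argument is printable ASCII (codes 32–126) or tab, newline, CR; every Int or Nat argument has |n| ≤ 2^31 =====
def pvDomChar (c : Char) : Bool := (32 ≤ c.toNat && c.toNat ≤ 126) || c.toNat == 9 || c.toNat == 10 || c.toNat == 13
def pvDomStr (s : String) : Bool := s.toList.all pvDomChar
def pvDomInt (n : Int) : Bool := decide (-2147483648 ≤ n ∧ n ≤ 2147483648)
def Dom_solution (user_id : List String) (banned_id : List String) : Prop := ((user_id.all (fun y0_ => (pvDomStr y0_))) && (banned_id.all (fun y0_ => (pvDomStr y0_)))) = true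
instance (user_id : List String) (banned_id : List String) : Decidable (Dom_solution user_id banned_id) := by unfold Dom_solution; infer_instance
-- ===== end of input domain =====

-- B replaces A's recursive DFS backtracking (shared mutable set + accumulator) by an iterative level-by-level expansion of partial assignments with a final set-comprehension dedupe; the per-pattern matching loop becomes a zip-based predicate filter (objective: alternative decomposition).
-- Both ports build the dedup keys on List Char (String.toList); this is exact, as only equality and the count of distinct keys are used.

-- ===== PORT A =====
-- inner character loop of A ('for j in range(len(user))'); only reached when the two lengths are equal
def aCheck : List Char → List Char → Bool
  | t :: ts, u :: us =>
    if t = '*' then aCheck ts us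
    else if t = u then aCheck ts us
    else false
  | _, _ => true

-- A's dfs: the index idx becomes the remaining suffix of banned_list; 'total.append' becomes the returned list
def aDfs (now : PySem.Set String) : List (List String) → List (List String)
  | [] => [PySem.List.sorted now (fun x => x) false]
  | cands :: rest =>
    cands.foldl
      (fun acc banned =>
        if PySem.Set.contains now banned then acc
        else acc ++ aDfs (PySem.Set.add now banned) rest) []

def solution (user_id : List String) (banned_id : List String) : Int :=
  let banned_list := banned_id.map (fun target =>
    user_id.foldl (fun acc user =>
      if target.toList.length ≠ user.toList.length then acc
      else if aCheck target.toList user.toList then acc ++ [user] else acc) [])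
  let total := aDfs PySem.Set.empty banned_list
  let total_set := total.foldl
    (fun s tot => PySem.Set.add s (tot.foldl (fun acc t => acc ++ t.toList) ([] : List Char)))
    PySem.Set.empty
  PySem.Set.len total_set

-- ===== PORT B =====
def bMatch (pat user : String) : Bool :=
  pat.toList.length == user.toList.length &&
    (pat.toList.zip user.toList).all (fun pu => pu.1 == '*' || pu.1 == pu.2)

def solution_alt (user_id : List String) (banned_id : List String) : Int :=
  let candidates := banned_id.map (fun pat => user_id.filter (fun u => bMatch pat u))
  -- 'states = [t + [u] for t in states for u in cands if u not in t]', level by level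
  let states := candidates.foldl (fun states cands =>
      states.flatMap (fun t =>
        (cands.filter (fun u => !(t.contains u))).map (fun u => t ++ [u]))) [[]]
  let keys := states.foldl (fun s t =>
      PySem.Set.add s
        (PySem.Chars.join [] ((PySem.List.sorted t (fun x => x) false).map String.toList)))
    PySem.Set.empty
  PySem.Set.len keys

-- ===== PRECONDITION & SPEC =====
def Spec_solution (user_id : List String) (banned_id : List String) (out : Int) : Prop := out = solution_alt user_id banned_id
instance (user_id : List String) (banned_id : List String) (out : Int) : Decidable (Spec_solution user_id banned_id out) := by unfold Spec_solution; infer_instance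

-- ===== CLAIM (what is proved, stated in full; the proofs are below) =====
def Claim_equal_solution : Prop := ∀ (user_id : List String) (banned_id : List String), Dom_solution user_id banned_id → Spec_solution user_id banned_id (solution user_id banned_id)

-- ===== LEMMAS AND PROOFS =====

theorem aCheck_eq_zip_all (t : List Char) : ∀ (u : List Char), t.length = u.length →
    aCheck t u = (t.zip u).all (fun pu => pu.1 == '*' || pu.1 == pu.2) := by
  induction t with
  | nil => intro u h; simp [aCheck]
  | cons a ts ih =>
    intro u h
    cases u with
    | nil => simp at h
    | cons b us =>
      simp only [List.length_cons, Nat.add_right_cancel_iff] at h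
      simp only [aCheck, List.zip_cons_cons, List.all_cons, ih us h]
      by_cases h1 : a = '*' <;> by_cases h2 : a = b <;> simp [h1, h2]

theorem banned_list_eq (user_id : List String) (target : String) :
    user_id.foldl (fun acc user =>
      if target.toList.length ≠ user.toList.length then acc
      else if aCheck target.toList user.toList then acc ++ [user] else acc) []
    = user_id.filter (fun u => bMatch target u) := by
  have hstep : ∀ (acc : List String) (user : String),
      (if target.toList.length ≠ user.toList.length then acc
       else if aCheck target.toList user.toList then acc ++ [user] else acc)
      = if bMatch target user then acc ++ [user] else acc := by
    intro acc user
    by_cases hl : target.toList.length = user.toList.length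
    · simp only [hl, ne_eq, not_true_eq_false, if_false, bMatch,
        aCheck_eq_zip_all _ _ hl, beq_self_eq_true, Bool.true_and]
    · have hl' : ¬ target.length = user.length := by
        intro h; apply hl; simpa using h
      simp [bMatch, hl']
  calc user_id.foldl (fun acc user =>
        if target.toList.length ≠ user.toList.length then acc
        else if aCheck target.toList user.toList then acc ++ [user] else acc) []
      = user_id.foldl (fun acc user => if bMatch target user then acc ++ [user] else acc) [] :=
        PySem.List.foldl_congr_mem _ _ _ _ (fun acc x _ => hstep acc x)
    _ = [] ++ (user_id.filter (fun u => bMatch target u)).map id :=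
        PySem.List.foldl_append_if _ id user_id []
    _ = user_id.filter (fun u => bMatch target u) := by simp

theorem join_eq_foldl (l : List String) :
    PySem.Chars.join [] (l.map String.toList)
      = l.foldl (fun acc t => acc ++ t.toList) ([] : List Char) := by
  rw [PySem.List.foldl_append_eq_flatMap]
  simp only [List.nil_append]
  induction l with
  | nil => rfl
  | cons a t ih =>
    cases t with
    | nil => simp [PySem.Chars.join, List.intercalate]
    | cons b t' =>
      simp only [List.map_cons, List.flatMap_cons] at *
      rw [← ih]
      simp [PySem.Chars.join, List.intercalate]

-- proof-side: the DFS enumeration with the partial tuple kept as a list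
def recProd (t : List String) : List (List String) → List (List String)
  | [] => [t]
  | cands :: rest =>
    (cands.filter (fun u => !(t.contains u))).flatMap (fun u => recProd (t ++ [u]) rest)

theorem filter_flatMap_ite (c : List String) (p : String → Bool)
    (f : String → List (List String)) :
    (c.filter p).flatMap f = c.flatMap (fun u => if p u then f u else []) := by
  induction c with
  | nil => rfl
  | cons a c ih =>
    by_cases h : p a <;> simp [List.filter_cons, h, ih]

theorem fold_add_eq_self (t : List String) (h : t.Nodup) :
    List.foldl PySem.Set.add PySem.Set.empty t = t :=
  PySem.Set.ofList_eq_self_of_nodup t h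

theorem aDfs_eq_recProd (bl : List (List String)) : ∀ (t : List String), t.Nodup →
    aDfs (List.foldl PySem.Set.add PySem.Set.empty t) bl
      = (recProd t bl).map (fun t' => PySem.List.sorted t' (fun x => x) false) := by
  induction bl with
  | nil =>
    intro t ht
    have hset : List.foldl PySem.Set.add ([] : PySem.Set String) t = t := fold_add_eq_self t ht
    simp [aDfs, recProd, hset]
  | cons cands rest ih =>
    intro t ht
    have hset : List.foldl PySem.Set.add PySem.Set.empty t = t := fold_add_eq_self t ht
    have hstep : ∀ (acc : List (List String)) (b : String),
        (if PySem.Set.contains (List.foldl PySem.Set.add PySem.Set.empty t) b then acc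
         else acc ++ aDfs (PySem.Set.add (List.foldl PySem.Set.add PySem.Set.empty t) b) rest)
        = acc ++ (if PySem.Set.contains (List.foldl PySem.Set.add PySem.Set.empty t) b then []
            else aDfs (PySem.Set.add (List.foldl PySem.Set.add PySem.Set.empty t) b) rest) := by
      intro acc b
      by_cases h : b ∈ List.foldl PySem.Set.add ([] : PySem.Set String) t <;>
        simp [PySem.Set.contains, h]
    calc aDfs (List.foldl PySem.Set.add PySem.Set.empty t) (cands :: rest)
        = cands.foldl (fun acc b => acc ++
            (if PySem.Set.contains (List.foldl PySem.Set.add PySem.Set.empty t) b then []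
             else aDfs (PySem.Set.add (List.foldl PySem.Set.add PySem.Set.empty t) b) rest)) [] := by
          show cands.foldl _ [] = _
          exact PySem.List.foldl_congr_mem _ _ _ _ (fun acc x _ => hstep acc x)
      _ = cands.flatMap (fun b =>
            if PySem.Set.contains (List.foldl PySem.Set.add PySem.Set.empty t) b then []
            else aDfs (PySem.Set.add (List.foldl PySem.Set.add PySem.Set.empty t) b) rest) := by
          rw [PySem.List.foldl_append_eq_flatMap]; simp
      _ = ((recProd t (cands :: rest)).map (fun t' => PySem.List.sorted t' (fun x => x) false)) := by
          show _ = (((cands.filter (fun u => !(t.contains u))).flatMap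
              (fun u => recProd (t ++ [u]) rest)).map _)
          rw [List.map_flatMap, filter_flatMap_ite]
          refine congrArg cands.flatMap (funext fun b => ?_)
          rw [hset]
          by_cases hb : t.contains b = true
          · have hbm : b ∈ t := by simpa using hb
            simp [PySem.Set.contains, hbm]
          · have hbm : b ∉ t := by simpa using hb
            have hadd : PySem.Set.add t b = t ++ [b] := by
              simp [PySem.Set.add, PySem.Set.contains, hbm]
            have hnd : (t ++ [b]).Nodup := by
              simp only [List.nodup_append, List.nodup_singleton]
              exact ⟨ht, trivial, fun a ha c hc => by rintro rfl; simp at hc; subst hc; exact hbm ha⟩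
            have hfold : List.foldl PySem.Set.add PySem.Set.empty (t ++ [b]) = t ++ [b] :=
              fold_add_eq_self _ hnd
            have := ih (t ++ [b]) hnd
            rw [hfold] at this
            rw [← hadd] at this
            simp only [PySem.Set.contains, this]
            simp [hbm]

theorem recProd_foldl (bl : List (List String)) : ∀ (states : List (List String)),
    states.flatMap (fun t => recProd t bl)
      = bl.foldl (fun states cands => states.flatMap
          (fun t => (cands.filter (fun u => !(t.contains u))).map (fun u => t ++ [u]))) states := by
  induction bl with
  | nil => intro states; simp [recProd]
  | cons cands rest ih =>
    intro states
    rw [List.foldl_cons, ← ih]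
    simp only [recProd, List.flatMap_assoc, List.flatMap_map]


-- ===== VERDICT (by name: the statement is the Claim_ definition above) =====
theorem solution_spec : Claim_equal_solution := by
  unfold Claim_equal_solution
  intro user_id banned_id _
  unfold Spec_solution solution solution_alt
  have hbl : banned_id.map (fun target =>
        user_id.foldl (fun acc user =>
          if target.toList.length ≠ user.toList.length then acc
          else if aCheck target.toList user.toList then acc ++ [user] else acc) [])
      = banned_id.map (fun pat => user_id.filter (fun u => bMatch pat u)) :=
    List.map_congr_left fun t _ => banned_list_eq user_id t
  rw [hbl]
  dsimp only
  set bl := banned_id.map (fun pat => user_id.filter (fun u => bMatch pat u)) with hblset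
  have h1 : aDfs PySem.Set.empty bl
      = (recProd [] bl).map (fun t' => PySem.List.sorted t' (fun x => x) false) := by
    have := aDfs_eq_recProd bl [] List.nodup_nil
    simpa using this
  have h2 : recProd [] bl
      = bl.foldl (fun states cands => states.flatMap
          (fun t => (cands.filter (fun u => !(t.contains u))).map (fun u => t ++ [u]))) [[]] := by
    have := recProd_foldl bl [[]]
    simpa using this
  rw [h1, h2.symm, List.foldl_map]
  refine congrArg _ (PySem.List.foldl_congr_mem _ _ _ _ (fun acc t _ => ?_))
  rw [join_eq_foldl]
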